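-- pv_equiv track=rewrite | github.com/felipefoschiera/Competitive-Programming | URI Online Judge/AD-HOC/1514 - Competição/comp.py | todosResolvidos
-- ===== SOURCE A (Python) =====
-- def todosResolvidos(problemas, n, m):
--     cnt = 0
--     todoProbResolvido = True
--     resolvPorTodos = False
--     for i in range(m):
--         resps = [row[i] for row in problemas]
--         if sum(resps) == 0: todoProbResolvido = False
--         if sum(resps) == n: resolvPorTodos = True
--     if todoProbResolvido: cnt += 1
--     if not resolvPorTodos: cnt += 1
--     return cnt
-- ===== SOURCE B (Python) =====
-- def todosResolvidos(problemas, n, m):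
--     sums = [0] * max(m, 0)
--     for row in problemas:
--         sums = [s + v for s, v in zip(sums, row)]
--     cnt = 0
--     if all(s != 0 for s in sums):
--         cnt += 1
--     if not any(s == n for s in sums):
--         cnt += 1
--     return cnt
-- ===== Notes on version B (the rewrite author's own statement) =====
-- stated objective: simpler
-- what changed: A scans column by column, rebuilding each column list from all rows and summing it twice; B makes a single row-major pass accumulating a column-sum table (zip truncates to the table's width) and then applies all/any to the sums.
import Mathlib
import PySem

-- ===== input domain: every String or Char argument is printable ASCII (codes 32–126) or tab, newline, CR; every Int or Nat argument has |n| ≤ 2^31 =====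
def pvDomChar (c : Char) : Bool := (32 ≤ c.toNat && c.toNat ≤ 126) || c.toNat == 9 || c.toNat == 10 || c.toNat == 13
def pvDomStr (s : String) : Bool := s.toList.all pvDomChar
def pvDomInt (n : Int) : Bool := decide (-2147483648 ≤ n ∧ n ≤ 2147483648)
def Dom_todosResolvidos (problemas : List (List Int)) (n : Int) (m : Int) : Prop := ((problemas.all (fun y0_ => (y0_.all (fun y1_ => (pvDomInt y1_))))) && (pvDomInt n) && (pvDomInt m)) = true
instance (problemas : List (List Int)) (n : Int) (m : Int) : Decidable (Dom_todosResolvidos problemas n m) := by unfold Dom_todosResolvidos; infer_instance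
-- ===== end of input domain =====

-- B replaces A's column-at-a-time scan (building each column list and summing it twice) by a
-- single row-major accumulation of column sums followed by two simple passes; objective: simpler.

-- ===== PORT A =====
-- for i in range(m): resps = [row[i] for row in problemas]; flags updated; cnt tallied at the end.
-- row[i] is ported as pyGetD with default 0; the out-of-range IndexError case is excluded by Pre_.
def todosResolvidos (problemas : List (List Int)) (n : Int) (m : Int) : Int :=
  let st := (PySem.List.pyRange 0 m 1).foldl
    (fun (st : Bool × Bool) i =>
      let resps := problemas.map (fun row => PySem.List.pyGetD row i 0)
      ((if resps.sum = 0 then false else st.1), (if resps.sum = n then true else st.2)))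
    (true, false)
  let cnt : Int := 0
  let cnt := if st.1 then cnt + 1 else cnt
  let cnt := if !st.2 then cnt + 1 else cnt
  cnt

-- ===== PORT B =====
-- sums = [0]*max(m,0); for row: sums = [s+v for s,v in zip(sums,row)]; then all/any over sums.
def todosResolvidos_alt (problemas : List (List Int)) (n : Int) (m : Int) : Int :=
  let sums0 : List Int := List.replicate (max m 0).toNat 0
  let sums := problemas.foldl (fun s row => List.zipWith (· + ·) s row) sums0
  let cnt : Int := 0
  let cnt := if sums.all (fun s => s != 0) then cnt + 1 else cnt
  let cnt := if !(sums.any (fun s => s == n)) then cnt + 1 else cnt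
  cnt

-- ===== PRECONDITION & SPEC =====
-- Pre_ excludes exactly the inputs on which A raises IndexError: m > 0 with some row shorter than m.
def Pre_todosResolvidos (problemas : List (List Int)) (n : Int) (m : Int) : Prop :=
  0 < m → ∀ row ∈ problemas, m ≤ (row.length : Int)
instance (problemas : List (List Int)) (n : Int) (m : Int) : Decidable (Pre_todosResolvidos problemas n m) := by unfold Pre_todosResolvidos; infer_instance
def pvWitness_todosResolvidos : List (List Int) × Int × Int := ([[1, 0], [0, 1]], 2, 2)

def Spec_todosResolvidos (problemas : List (List Int)) (n : Int) (m : Int) (out : Int) : Prop := out = todosResolvidos_alt problemas n m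
instance (problemas : List (List Int)) (n : Int) (m : Int) (out : Int) : Decidable (Spec_todosResolvidos problemas n m out) := by unfold Spec_todosResolvidos; infer_instance

-- ===== CLAIM (what is proved, stated in full; the proofs are below) =====
def Claim_equal_todosResolvidos : Prop := ∀ (problemas : List (List Int)) (n : Int) (m : Int), Dom_todosResolvidos problemas n m → Pre_todosResolvidos problemas n m → Spec_todosResolvidos problemas n m (todosResolvidos problemas n m)

-- ===== LEMMAS AND PROOFS =====

lemma pv_zip_getD : ∀ (a b : List Int) (j : Nat), j < a.length → j < b.length →
    (List.zipWith (· + ·) a b).getD j 0 = a.getD j 0 + b.getD j 0 := by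
  intro a
  induction a with
  | nil => intro b j h _; simp at h
  | cons x a ih =>
    intro b j h1 h2
    cases b with
    | nil => simp at h2
    | cons y b =>
      cases j with
      | zero => simp
      | succ j =>
        simp only [List.zipWith_cons_cons, List.getD_cons_succ]
        exact ih b j (by simpa using h1) (by simpa using h2)

lemma pv_self_eq_map_getD (acc : List Int) :
    acc = (List.range acc.length).map (fun j => acc.getD j 0) := by
  apply List.ext_getElem
  · simp
  · intro i h1 h2
    simp [List.getD_eq_getElem?_getD, List.getElem?_eq_getElem h1]

lemma pv_foldzip (L : List (List Int)) : ∀ (acc : List Int), (∀ r ∈ L, acc.length ≤ r.length) →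
    L.foldl (fun s r => List.zipWith (· + ·) s r) acc
    = (List.range acc.length).map (fun j => acc.getD j 0 + (L.map (fun r => r.getD j 0)).sum) := by
  induction L with
  | nil =>
    intro acc _
    simpa using pv_self_eq_map_getD acc
  | cons r L ih =>
    intro acc h
    have hr : acc.length ≤ r.length := h r (by simp)
    have hlen : (List.zipWith (· + ·) acc r).length = acc.length := by
      simp [List.length_zipWith]; omega
    simp only [List.foldl_cons]
    rw [ih _ (by intro r' hr'; rw [hlen]; exact h r' (by simp [hr']))]
    rw [hlen]
    apply List.map_congr_left
    intro j hj
    have hj' : j < acc.length := List.mem_range.mp hj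
    rw [pv_zip_getD acc r j hj' (lt_of_lt_of_le hj' hr)]
    simp [add_assoc]

lemma pv_boolfold (F : Int → Int) (n : Int) : ∀ (l : List Int) (a b : Bool),
    l.foldl (fun (st : Bool × Bool) i =>
        ((if F i = 0 then false else st.1), (if F i = n then true else st.2))) (a, b)
    = (a && l.all (fun i => F i != 0), b || l.any (fun i => F i == n)) := by
  intro l
  induction l with
  | nil => intro a b; simp
  | cons i l ih =>
    intro a b
    simp only [List.foldl_cons, List.all_cons, List.any_cons]
    rw [ih]
    have e1 : (if F i = 0 then false else a) = (a && (F i != 0)) := by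
      by_cases h : F i = 0 <;> simp [h]
    have e2 : (if F i = n then true else b) = (b || (F i == n)) := by
      by_cases h : F i = n <;> simp [h]
    rw [e1, e2]
    simp [Bool.and_assoc, Bool.or_assoc]

lemma pv_getD_replicate (w j : Nat) : (List.replicate w (0 : Int)).getD j 0 = 0 := by
  by_cases h : j < w
  · simp [List.getD_eq_getElem?_getD, h]
  · simp [List.getD_eq_getElem?_getD, h]

lemma pv_fold_nil (L : List (List Int)) :
    L.foldl (fun s row => List.zipWith (· + ·) s row) ([] : List Int) = [] := by
  induction L with
  | nil => rfl
  | cons r L ih => simpa using ih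

-- ===== VERDICT (by name: the statement is the Claim_ definition above) =====
theorem todosResolvidos_spec : Claim_equal_todosResolvidos := by
  intro problemas n m _ hpre
  unfold Spec_todosResolvidos todosResolvidos todosResolvidos_alt
  simp only []
  by_cases hm : m ≤ 0
  · -- range(m) is empty and sums is []
    rw [PySem.List.pyRange_one_eq_nil hm]
    have hw : (max m 0).toNat = 0 := by omega
    rw [hw]
    rw [List.replicate_zero, pv_fold_nil problemas]
    simp
  · have hm : 0 < m := by omega
    have hrows : ∀ r ∈ problemas, (List.replicate (max m 0).toNat (0:Int)).length ≤ r.length := by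
      intro r hr
      have := hpre hm r hr
      simp [List.length_replicate]
      omega
    rw [pv_foldzip problemas _ hrows]
    rw [pv_boolfold (fun i => (problemas.map (fun row => PySem.List.pyGetD row i 0)).sum) n]
    have hF : ∀ j : Nat,
        (problemas.map (fun row => PySem.List.pyGetD row (j : Int) 0)).sum
        = (List.replicate (max m 0).toNat (0:Int)).getD j 0 + (problemas.map (fun r => r.getD j 0)).sum := by
      intro j
      rw [pv_getD_replicate, zero_add]
      congr 1
      apply List.map_congr_left
      intro r _
      exact PySem.List.pyGetD_natCast r j 0
    rw [PySem.List.pyRange_one 0 m]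
    have hlenrep : (List.replicate (max m 0).toNat (0:Int)).length = (m - 0).toNat := by
      simp; omega
    rw [hlenrep]
    simp only [List.all_map, List.any_map, Function.comp_def, zero_add,
      Bool.true_and, Bool.false_or]
    simp only [hF]
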